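-- pv_equiv track=rewrite | github.com/VRL10/Trabalho_Redes02_Aval02 | servidorSequencial.py | analisar_requisicao_http
-- ===== SOURCE A (Python) =====
-- def analisar_requisicao_http(dados):
--     """Faz análise manual da requisição HTTP -> Não foi usada nenhuma biblioteca HTTP (tipo Flask ou FastAPI).
--        Por conta disso,  o servidor precisa entender sozinho o que o cliente mandou: método (GET, POST...), caminho, cabeçalhos e etc"""
--     try:
--         linhas = dados.split('\r\n')
--         if len(linhas) == 0:
--             return None, None, {}, ''
--
--         primeira_linha = linhas[0].split()
--         if len(primeira_linha) < 3:
--             return None, None, {}, ''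
--
--         metodo = primeira_linha[0]
--         caminho = primeira_linha[1]
--
--         cabecalhos = {}
--         corpo = ''
--         achou_vazio = False
--
--         for i in range(1, len(linhas)):
--             linha_atual = linhas[i]
--
--             if linha_atual == '':
--                 achou_vazio = True
--                 continue
--
--             if achou_vazio:
--                 corpo += linha_atual
--             else:
--                 if ':' in linha_atual:
--                     partes = linha_atual.split(':', 1)
--                     chave = partes[0].strip()
--                     valor = partes[1].strip()
--                     cabecalhos[chave] = valor
--
--         return metodo, caminho, cabecalhos, corpo.strip()
--
--     except:
--         return None, None, {}, ''
-- ===== SOURCE B (Python) =====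
-- def analisar_requisicao_http(dados):
--     """Boundary-split rewrite: locate the first empty line once, then build the
--     headers from the slice before it and the body from the slice after it."""
--     linhas = dados.split('\r\n')
--     primeira_linha = linhas[0].split()
--     if len(primeira_linha) < 3:
--         return None, None, {}, ''
--
--     resto = linhas[1:]
--     try:
--         corte = resto.index('')
--     except ValueError:
--         corte = len(resto)
--
--     cabecalhos = {}
--     for linha in resto[:corte]:
--         if ':' in linha:
--             chave, valor = linha.split(':', 1)
--             cabecalhos[chave.strip()] = valor.strip()
--
--     corpo = ''.join(l for l in resto[corte + 1:] if l != '')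
--     return primeira_linha[0], primeira_linha[1], cabecalhos, corpo.strip()
-- ===== Notes on version B (the rewrite author's own statement) =====
-- stated objective: alternative
-- what changed: Replaces the single stateful loop with an achou_vazio flag by locating the first empty line once and building headers and body from the two slices around it.
import Mathlib
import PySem

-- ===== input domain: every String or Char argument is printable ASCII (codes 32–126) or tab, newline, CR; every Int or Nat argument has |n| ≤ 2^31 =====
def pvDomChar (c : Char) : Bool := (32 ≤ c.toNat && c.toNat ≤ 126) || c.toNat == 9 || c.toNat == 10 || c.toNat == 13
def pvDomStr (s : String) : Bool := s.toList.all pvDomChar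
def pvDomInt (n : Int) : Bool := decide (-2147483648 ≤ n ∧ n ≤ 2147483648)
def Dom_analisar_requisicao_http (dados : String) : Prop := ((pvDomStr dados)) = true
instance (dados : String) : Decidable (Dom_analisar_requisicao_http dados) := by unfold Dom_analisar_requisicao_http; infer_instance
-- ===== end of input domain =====

-- B keeps A's return value but finds the first empty line once and derives headers/body from the two slices; equivalence on all inputs.

-- shared per-header-line parsing (both Pythons run the identical `split(':', 1)` code on a header line)
def pvHdr (d : PySem.Dict String String) (linha : String) : PySem.Dict String String :=
  if PySem.Str.isIn ":" linha then
    let partes := (PySem.Str.splitMax? linha ":" 1).getD []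
    d.insert (PySem.Str.strip (PySem.List.pyGetD partes 0 "")) (PySem.Str.strip (PySem.List.pyGetD partes 1 ""))
  else d

-- ===== PORT A =====
-- loop state: (cabecalhos, corpo as chars, achou_vazio)
def pvStepA (st : PySem.Dict String String × List Char × Bool) (linha : String) :
    PySem.Dict String String × List Char × Bool :=
  if linha = "" then (st.1, st.2.1, true)
  else if st.2.2 then (st.1, st.2.1 ++ linha.toList, st.2.2)
  else (pvHdr st.1 linha, st.2.1, st.2.2)

def analisar_requisicao_http (dados : String) : Option String × Option String × (List (String × String)) × String :=
  let linhas := (PySem.Str.split? dados "\r\n").getD []   -- sep ≠ "" so split? is always some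
  if linhas.length = 0 then (none, none, [], "")
  else
    let primeira_linha := PySem.Str.split₀ (PySem.List.pyGetD linhas 0 "")
    if primeira_linha.length < 3 then (none, none, [], "")
    else
      let metodo := PySem.List.pyGetD primeira_linha 0 ""
      let caminho := PySem.List.pyGetD primeira_linha 1 ""
      let fin := (linhas.drop 1).foldl pvStepA (PySem.Dict.empty, [], false)
      (some metodo, some caminho, fin.1.items, String.mk (PySem.Chars.strip fin.2.1))

-- ===== PORT B =====
def analisar_requisicao_http_alt (dados : String) : Option String × Option String × (List (String × String)) × String :=
  let linhas := (PySem.Str.split? dados "\r\n").getD []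
  let primeira_linha := PySem.Str.split₀ (PySem.List.pyGetD linhas 0 "")
  if primeira_linha.length < 3 then (none, none, [], "")
  else
    let resto := linhas.drop 1
    let corte := (PySem.List.index? resto "").getD resto.length
    let cabecalhos := (resto.take corte).foldl pvHdr PySem.Dict.empty
    let corpo := PySem.Chars.join []
      (((resto.drop (corte + 1)).filter (fun l => l ≠ "")).map String.toList)
    (some (PySem.List.pyGetD primeira_linha 0 ""), some (PySem.List.pyGetD primeira_linha 1 ""),
      cabecalhos.items, String.mk (PySem.Chars.strip corpo))

-- ===== PRECONDITION & SPEC =====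
def Spec_analisar_requisicao_http (dados : String) (out : Option String × Option String × (List (String × String)) × String) : Prop := out = analisar_requisicao_http_alt dados
instance (dados : String) (out : Option String × Option String × (List (String × String)) × String) : Decidable (Spec_analisar_requisicao_http dados out) := by unfold Spec_analisar_requisicao_http; infer_instance

-- ===== CLAIM (what is proved, stated in full; the proofs are below) =====
def Claim_equal_analisar_requisicao_http : Prop := ∀ (dados : String), Dom_analisar_requisicao_http dados → Spec_analisar_requisicao_http dados (analisar_requisicao_http dados)

-- ===== LEMMAS AND PROOFS =====

-- join with empty separator is concatenation
theorem pv_join_nil_flat (parts : List (List Char)) :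
    PySem.Chars.join [] parts = parts.flatMap id := by
  induction parts with
  | nil => simp [PySem.Chars.join_nil]
  | cons p rest ih =>
    cases rest with
    | nil => simp [PySem.Chars.join_singleton]
    | cons q r => simp [PySem.Chars.join_cons_cons, ih]

-- after the empty line was seen, A's loop only concatenates the non-empty lines
theorem pv_loop_true (l : List String) (d : PySem.Dict String String) (c : List Char) :
    l.foldl pvStepA (d, c, true)
      = (d, c ++ (l.filter (fun s => s ≠ "")).flatMap String.toList, true) := by
  induction l generalizing c with
  | nil => simp
  | cons s t ih =>
    by_cases hs : s = "" <;>
      simp [pvStepA, hs, ih, List.filter_cons, List.flatMap]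

-- A's one-pass loop equals B's boundary decomposition
theorem pv_loop_eq (l : List String) (d : PySem.Dict String String) :
    l.foldl pvStepA (d, [], false)
      = ((l.take ((PySem.List.index? l "").getD l.length)).foldl pvHdr d,
         ((l.drop ((PySem.List.index? l "").getD l.length + 1)).filter
            (fun s => s ≠ "")).flatMap String.toList,
         l.contains "") := by
  induction l generalizing d with
  | nil => simp [PySem.List.index?]
  | cons s t ih =>
    by_cases hs : s = ""
    · subst hs
      rw [PySem.List.index?_cons_self]
      simp [pvStepA, pv_loop_true]
    · rw [PySem.List.index?_cons_of_ne _ hs]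
      have step : (s :: t).foldl pvStepA (d, [], false) = t.foldl pvStepA (pvHdr d s, [], false) := by
        simp [pvStepA, hs]
      rw [step, ih (pvHdr d s)]
      cases hidx : PySem.List.index? t "" with
      | none =>
        have hnm : "" ∉ t := (PySem.List.index?_eq_none_iff t "").mp hidx
        simp [hidx, List.take_of_length_le, List.contains_cons, hs, hnm,
          List.drop_eq_nil_of_le (by omega : t.length ≤ t.length + 1)]
      | some k =>
        have hmem : "" ∈ t := by
          have h' : (PySem.List.index? t "").isSome = true := by rw [hidx]; rfl
          exact (PySem.List.index?_isSome_iff _ _).mp h'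
        simp [hidx, List.contains_cons, hs, hmem]

-- ===== VERDICT (by name: the statement is the Claim_ definition above) =====
theorem analisar_requisicao_http_spec : Claim_equal_analisar_requisicao_http := by
  intro dados _
  unfold Spec_analisar_requisicao_http analisar_requisicao_http analisar_requisicao_http_alt
  cases hsplit : (PySem.Str.split? dados "\r\n").getD [] with
  | nil => simp; decide
  | cons h t =>
    by_cases h3 : (PySem.Str.split₀ (PySem.List.pyGetD (h :: t) 0 "")).length < 3
    · simp at h3 ⊢; simp [h3]
    · simp only [List.length_cons, List.drop_one, List.tail_cons]
      rw [if_neg (Nat.succ_ne_zero _), if_neg h3, if_neg h3,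
        pv_loop_eq t PySem.Dict.empty, pv_join_nil_flat]
      simp [List.flatMap_def]
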